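-- pv_equiv track=rewrite | github.com/PolycarpusTack/mimir | content_generation.py | _filter_articles_by_preferences
-- ===== SOURCE A (Python) =====
-- from typing import Any, Dict, List, Optional, Tuple
--
-- def _filter_articles_by_preferences(
--
--     articles: List[Dict[str, Any]],
--     user_preferences: Optional[Dict[str, Any]],
--     focus_areas: Optional[List[str]],
--     categories: Optional[List[str]]
-- ) -> List[Dict[str, Any]]:
--     """Filter articles based on preferences and focus areas."""
--     filtered = []
--
--     for article in articles:
--         include = True
--
--         # Filter by categories if specified
--         if categories:
--             article_category = article.get('category', '').lower()
--             if not any(cat.lower() in article_category for cat in categories):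
--                 include = False
--
--         # Filter by focus areas (check in title/content)
--         if focus_areas and include:
--             title_content = (article.get('title', '') + ' ' + article.get('content', '')).lower()
--             if not any(area.lower() in title_content for area in focus_areas):
--                 include = False
--
--         # Apply user preferences (simplified)
--         if user_preferences and include:
--             interests = user_preferences.get('interests', [])
--             if interests:
--                 title_content = (article.get('title', '') + ' ' + article.get('content', '')).lower()
--                 if not any(interest.lower() in title_content for interest in interests):
--                     include = False
--
--         if include:
--             filtered.append(article)
--
--     return filtered
-- ===== SOURCE B (Python) =====
-- def _filter_articles_by_preferences(articles, user_preferences, focus_areas, categories):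
--     """Filter articles in three independent passes (category, focus areas, interests)."""
--     result = articles
--     if categories:
--         cats = [c.lower() for c in categories]
--         result = [a for a in result
--                   if any(c in a.get('category', '').lower() for c in cats)]
--     if focus_areas:
--         areas = [f.lower() for f in focus_areas]
--         result = [a for a in result
--                   if any(f in (a.get('title', '') + ' ' + a.get('content', '')).lower()
--                          for f in areas)]
--     if user_preferences:
--         interests = [i.lower() for i in user_preferences.get('interests', [])]
--         if interests:
--             result = [a for a in result
--                       if any(i in (a.get('title', '') + ' ' + a.get('content', '')).lower()
--                              for i in interests)]
--     return result
-- ===== Notes on version B (the rewrite author's own statement) =====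
-- stated objective: alternative
-- what changed: Replaces the single per-article loop with an include flag and nested guards by three independent order-preserving filter passes (category, focus areas, interests), each lowercasing its pattern list once up front.
import Mathlib
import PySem

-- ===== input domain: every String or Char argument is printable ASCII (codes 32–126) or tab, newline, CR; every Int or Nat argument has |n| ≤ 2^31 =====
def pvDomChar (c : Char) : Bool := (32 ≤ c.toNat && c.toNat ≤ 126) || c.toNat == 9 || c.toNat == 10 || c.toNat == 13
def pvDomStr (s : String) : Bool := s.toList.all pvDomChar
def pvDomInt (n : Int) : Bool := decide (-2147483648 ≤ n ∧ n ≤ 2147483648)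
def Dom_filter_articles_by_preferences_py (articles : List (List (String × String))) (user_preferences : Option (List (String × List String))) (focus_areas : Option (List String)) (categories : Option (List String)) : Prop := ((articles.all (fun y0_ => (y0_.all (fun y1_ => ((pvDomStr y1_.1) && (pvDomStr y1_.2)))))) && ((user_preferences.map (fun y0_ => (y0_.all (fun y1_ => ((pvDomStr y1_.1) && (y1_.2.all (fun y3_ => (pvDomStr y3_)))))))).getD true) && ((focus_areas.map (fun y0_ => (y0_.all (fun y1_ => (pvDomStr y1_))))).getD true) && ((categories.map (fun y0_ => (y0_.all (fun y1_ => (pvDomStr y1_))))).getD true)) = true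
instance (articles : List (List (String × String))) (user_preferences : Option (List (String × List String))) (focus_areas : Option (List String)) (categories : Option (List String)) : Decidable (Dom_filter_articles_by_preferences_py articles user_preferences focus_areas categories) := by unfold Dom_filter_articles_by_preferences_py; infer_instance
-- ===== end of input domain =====

-- B rewrites A's single per-article loop (include flag, nested guards) as three independent
-- order-preserving filter passes; equivalence is proved for the return value.

-- ===== PORT A =====
-- A-side helper: the loop body's computation of `include` for one article, guard by guard.
def pvIncludeA (user_preferences : Option (List (String × List String))) (focus_areas : Option (List String)) (categories : Option (List String)) (article : List (String × String)) : Bool :=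
  let include0 : Bool := true
  -- if categories: if not any(cat.lower() in article.get('category','').lower()): include = False
  let include1 : Bool :=
    match categories with
    | some (c :: cs) =>
        if (c :: cs).any (fun cat =>
            PySem.Str.isIn (PySem.Str.lower cat)
              (PySem.Str.lower (PySem.Dict.getD ⟨article⟩ "category" ""))) then include0
        else false
    | _ => include0
  -- if focus_areas and include: check title+' '+content
  let include2 : Bool :=
    match focus_areas with
    | some (f :: fs) =>
        if include1 then
          if (f :: fs).any (fun area =>
              PySem.Str.isIn (PySem.Str.lower area)
                (PySem.Str.lower (PySem.Dict.getD ⟨article⟩ "title" "" ++ " " ++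
                                  PySem.Dict.getD ⟨article⟩ "content" ""))) then include1
          else false
        else include1
    | _ => include1
  -- if user_preferences and include: interests = up.get('interests', []); if interests: check
  match user_preferences with
  | some (p :: ps) =>
      if include2 then
        match PySem.Dict.getD ⟨p :: ps⟩ "interests" [] with
        | [] => include2
        | i :: is_ =>
            if (i :: is_).any (fun interest =>
                PySem.Str.isIn (PySem.Str.lower interest)
                  (PySem.Str.lower (PySem.Dict.getD ⟨article⟩ "title" "" ++ " " ++
                                    PySem.Dict.getD ⟨article⟩ "content" ""))) then include2
            else false
      else include2
  | _ => include2

def filter_articles_by_preferences_py (articles : List (List (String × String))) (user_preferences : Option (List (String × List String))) (focus_areas : Option (List String)) (categories : Option (List String)) : List (List (String × String)) :=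
  articles.foldl (fun filtered article =>
    if pvIncludeA user_preferences focus_areas categories article then filtered ++ [article]
    else filtered) []

-- ===== PORT B =====
-- B-side helpers: one predicate per pass, pattern lists already lowercased.
def pvMatchCat (lcats : List String) (a : List (String × String)) : Bool :=
  lcats.any (fun c => PySem.Str.isIn c (PySem.Str.lower (PySem.Dict.getD ⟨a⟩ "category" "")))

def pvMatchText (lpats : List String) (a : List (String × String)) : Bool :=
  lpats.any (fun p => PySem.Str.isIn p
    (PySem.Str.lower (PySem.Dict.getD ⟨a⟩ "title" "" ++ " " ++ PySem.Dict.getD ⟨a⟩ "content" "")))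

def filter_articles_by_preferences_py_alt (articles : List (List (String × String))) (user_preferences : Option (List (String × List String))) (focus_areas : Option (List String)) (categories : Option (List String)) : List (List (String × String)) :=
  let r1 :=
    match categories with
    | some (c :: cs) => articles.filter (pvMatchCat ((c :: cs).map PySem.Str.lower))
    | _ => articles
  let r2 :=
    match focus_areas with
    | some (f :: fs) => r1.filter (pvMatchText ((f :: fs).map PySem.Str.lower))
    | _ => r1
  match user_preferences with
  | some (p :: ps) =>
      match (PySem.Dict.getD ⟨p :: ps⟩ "interests" []).map PySem.Str.lower with
      | [] => r2
      | i :: is_ => r2.filter (pvMatchText (i :: is_))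
  | _ => r2

-- ===== PRECONDITION & SPEC =====
def Spec_filter_articles_by_preferences_py (articles : List (List (String × String))) (user_preferences : Option (List (String × List String))) (focus_areas : Option (List String)) (categories : Option (List String)) (out : List (List (String × String))) : Prop := out = filter_articles_by_preferences_py_alt articles user_preferences focus_areas categories
instance (articles : List (List (String × String))) (user_preferences : Option (List (String × List String))) (focus_areas : Option (List String)) (categories : Option (List String)) (out : List (List (String × String))) : Decidable (Spec_filter_articles_by_preferences_py articles user_preferences focus_areas categories out) := by unfold Spec_filter_articles_by_preferences_py; infer_instance

-- ===== CLAIM (what is proved, stated in full; the proofs are below) =====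
def Claim_equal_filter_articles_by_preferences_py : Prop := ∀ (articles : List (List (String × String))) (user_preferences : Option (List (String × List String))) (focus_areas : Option (List String)) (categories : Option (List String)), Dom_filter_articles_by_preferences_py articles user_preferences focus_areas categories → Spec_filter_articles_by_preferences_py articles user_preferences focus_areas categories (filter_articles_by_preferences_py articles user_preferences focus_areas categories)

-- ===== LEMMAS AND PROOFS =====

theorem pv_if_id (b : Bool) : (if b then true else false) = b := by cases b <;> rfl

theorem pv_guard_chain (inc b : Bool) : (if inc then (if b then inc else false) else inc) = (inc && b) := by
  cases inc <;> cases b <;> rfl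

-- ===== VERDICT (by name: the statement is the Claim_ definition above) =====
set_option maxHeartbeats 1000000 in
theorem filter_articles_by_preferences_py_spec : Claim_equal_filter_articles_by_preferences_py := by
  intro articles up fa cats _
  show _ = _
  unfold filter_articles_by_preferences_py filter_articles_by_preferences_py_alt
  rw [PySem.List.foldl_append_if_eq_filter (pvIncludeA up fa cats) articles []]
  simp only [List.nil_append]
  rcases up with _ | ⟨_ | ⟨p, ps⟩⟩
  · rcases cats with _ | ⟨_ | ⟨c, cs⟩⟩ <;> rcases fa with _ | ⟨_ | ⟨f, fs⟩⟩ <;>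
      (simp only [List.map_nil, List.map_cons, List.filter_filter]; first | (apply List.filter_eq_self.mpr; intro a _; simp [pvIncludeA, pv_if_id, pv_guard_chain]) | (apply List.filter_congr; intro a _; simp only [pvIncludeA, pv_if_id, pv_guard_chain]; simp [pvMatchCat, pvMatchText, List.any_map, Function.comp_def, Bool.and_assoc, Bool.and_comm, Bool.and_left_comm]))
  · rcases cats with _ | ⟨_ | ⟨c, cs⟩⟩ <;> rcases fa with _ | ⟨_ | ⟨f, fs⟩⟩ <;>
      (simp only [List.map_nil, List.map_cons, List.filter_filter]; first | (apply List.filter_eq_self.mpr; intro a _; simp [pvIncludeA, pv_if_id, pv_guard_chain]) | (apply List.filter_congr; intro a _; simp only [pvIncludeA, pv_if_id, pv_guard_chain]; simp [pvMatchCat, pvMatchText, List.any_map, Function.comp_def, Bool.and_assoc, Bool.and_comm, Bool.and_left_comm]))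
  · rcases h : PySem.Dict.getD (⟨p :: ps⟩ : PySem.Dict String (List String)) "interests" [] with _ | ⟨i, is_⟩ <;>
    rcases cats with _ | ⟨_ | ⟨c, cs⟩⟩ <;> rcases fa with _ | ⟨_ | ⟨f, fs⟩⟩ <;>
      (simp only [h, List.map_nil, List.map_cons, List.filter_filter]; first | (apply List.filter_eq_self.mpr; intro a _; simp [pvIncludeA, h, pv_if_id, pv_guard_chain]) | (apply List.filter_congr; intro a _; simp only [pvIncludeA, h, pv_if_id, pv_guard_chain]; simp [pvMatchCat, pvMatchText, List.any_map, Function.comp_def, Bool.and_assoc, Bool.and_comm, Bool.and_left_comm]))
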